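-- pv_equiv track=rewrite | github.com/Yaoyuxuanyyds/Training-free-Residual-SD3 | SD3.5-Residual/compute_sd3_text_procrustes.py | _build_bucket_edges
-- ===== SOURCE A (Python) =====
-- from typing import Dict, Iterable, List, Optional, Tuple
--
-- def _build_bucket_edges(num_train_timesteps: int, num_buckets: int) -> List[int]:
--     if num_buckets <= 1:
--         return [0, num_train_timesteps]
--     base = num_train_timesteps // num_buckets
--     remainder = num_train_timesteps % num_buckets
--     edges = [0]
--     for bucket_idx in range(num_buckets):
--         size = base + (1 if bucket_idx < remainder else 0)
--         edges.append(edges[-1] + size)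
--     edges[-1] = num_train_timesteps
--     return edges
-- ===== SOURCE B (Python) =====
-- from typing import List
--
-- def _build_bucket_edges(num_train_timesteps: int, num_buckets: int) -> List[int]:
--     if num_buckets <= 1:
--         return [0, num_train_timesteps]
--     base = num_train_timesteps // num_buckets
--     remainder = num_train_timesteps % num_buckets
--     return [i * base + min(i, remainder) for i in range(num_buckets + 1)]
-- ===== Notes on version B (the rewrite author's own statement) =====
-- stated objective: simpler
-- what changed: Replaces the accumulator loop with a running sum and final-element overwrite by a single closed-form comprehension computing each edge independently as i*base + min(i, remainder).
import Mathlib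
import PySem

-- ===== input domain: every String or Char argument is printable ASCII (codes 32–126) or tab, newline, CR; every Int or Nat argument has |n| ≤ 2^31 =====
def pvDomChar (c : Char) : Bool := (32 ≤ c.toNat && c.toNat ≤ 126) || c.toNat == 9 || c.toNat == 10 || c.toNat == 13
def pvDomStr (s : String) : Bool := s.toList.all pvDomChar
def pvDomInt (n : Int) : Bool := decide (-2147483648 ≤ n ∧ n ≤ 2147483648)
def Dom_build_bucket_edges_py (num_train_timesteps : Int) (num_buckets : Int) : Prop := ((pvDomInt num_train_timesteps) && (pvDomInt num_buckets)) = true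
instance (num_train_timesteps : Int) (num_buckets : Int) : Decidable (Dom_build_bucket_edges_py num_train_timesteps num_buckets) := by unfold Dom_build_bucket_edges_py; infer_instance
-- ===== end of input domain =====

-- B replaces A's running-sum accumulator loop (plus final overwrite) by a closed-form
-- comprehension: edge i = i*base + min(i, remainder). Objective: simpler.

-- ===== PORT A =====
def build_bucket_edges_py (num_train_timesteps : Int) (num_buckets : Int) : List Int :=
  if num_buckets ≤ 1 then [0, num_train_timesteps]
  else
    let base := PySem.Int.floordiv num_train_timesteps num_buckets
    let remainder := PySem.Int.mod num_train_timesteps num_buckets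
    let edges :=
      (PySem.List.pyRange 0 num_buckets 1).foldl
        (fun edges bucket_idx =>
          let size := base + (if bucket_idx < remainder then 1 else 0)
          edges ++ [PySem.List.pyGetD edges (-1) 0 + size])
        [0]
    -- edges[-1] = num_train_timesteps
    edges.dropLast ++ [num_train_timesteps]

-- ===== PORT B =====
def build_bucket_edges_py_alt (num_train_timesteps : Int) (num_buckets : Int) : List Int :=
  if num_buckets ≤ 1 then [0, num_train_timesteps]
  else
    let base := PySem.Int.floordiv num_train_timesteps num_buckets
    let remainder := PySem.Int.mod num_train_timesteps num_buckets
    (PySem.List.pyRange 0 (num_buckets + 1) 1).map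
      (fun i => i * base + min i remainder)

-- ===== PRECONDITION & SPEC =====
def Spec_build_bucket_edges_py (num_train_timesteps : Int) (num_buckets : Int) (out : List Int) : Prop := out = build_bucket_edges_py_alt num_train_timesteps num_buckets
instance (num_train_timesteps : Int) (num_buckets : Int) (out : List Int) : Decidable (Spec_build_bucket_edges_py num_train_timesteps num_buckets out) := by unfold Spec_build_bucket_edges_py; infer_instance

-- ===== CLAIM (what is proved, stated in full; the proofs are below) =====
def Claim_equal_build_bucket_edges_py : Prop := ∀ (num_train_timesteps : Int) (num_buckets : Int), Dom_build_bucket_edges_py num_train_timesteps num_buckets → Spec_build_bucket_edges_py num_train_timesteps num_buckets (build_bucket_edges_py num_train_timesteps num_buckets)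

-- ===== LEMMAS AND PROOFS =====

-- Loop invariant: after folding over range(0, k), the accumulator is exactly the
-- closed-form list of edges 0 .. k.
theorem edges_foldl_invariant (base r : Int) (hr : 0 ≤ r) (k : Nat) :
    (PySem.List.pyRange 0 (k : Int) 1).foldl
        (fun edges bucket_idx =>
          edges ++ [PySem.List.pyGetD edges (-1) 0 +
            (base + (if bucket_idx < r then 1 else 0))])
        [0]
      = (PySem.List.pyRange 0 ((k : Int) + 1) 1).map (fun i => i * base + min i r) := by
  induction k with
  | zero =>
    rw [show ((0:Nat):Int) = 0 by norm_num]
    rw [show (0:Int) + 1 = 0 + 1 from rfl, PySem.List.pyRange_one_singleton,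
        PySem.List.pyRange_one_eq_nil (by omega)]
    simp [min_eq_left hr]
  | succ m ih =>
    rw [show ((m + 1 : Nat) : Int) = (m : Int) + 1 by push_cast; ring,
        PySem.List.pyRange_one_succ_right (a := 0) (b := (m : Int)) (by omega),
        List.foldl_append, ih,
        PySem.List.pyRange_one_succ_right (a := 0) (b := (m : Int) + 1) (by omega)]
    simp only [List.foldl_cons, List.foldl_nil, List.map_append, List.map_cons, List.map_nil]
    congr 1
    rw [show ((PySem.List.pyRange 0 ((m : Int) + 1) 1).map (fun i => i * base + min i r))
          = ((PySem.List.pyRange 0 (m : Int) 1).map (fun i => i * base + min i r))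
            ++ [(m : Int) * base + min (m : Int) r] by
        rw [PySem.List.pyRange_one_succ_right (a := 0) (b := (m : Int)) (by omega)]; simp]
    rw [PySem.List.pyGetD_neg_one_append_singleton]
    have hm : (0 : Int) ≤ (m : Int) := Int.natCast_nonneg m
    have hbase1 : ((m : Int) + 1) * base = (m : Int) * base + base := by ring
    congr 1
    split_ifs with h <;> omega

theorem build_bucket_edges_py_eq (num_train_timesteps num_buckets : Int) :
    build_bucket_edges_py num_train_timesteps num_buckets
      = build_bucket_edges_py_alt num_train_timesteps num_buckets := by
  unfold build_bucket_edges_py build_bucket_edges_py_alt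
  by_cases hg : num_buckets ≤ 1
  · simp [hg]
  · simp only [if_neg hg]
    have hn : 0 < num_buckets := by omega
    set base := PySem.Int.floordiv num_train_timesteps num_buckets with hbase
    set r := PySem.Int.mod num_train_timesteps num_buckets with hr
    have hk : ((num_buckets.toNat : Int)) = num_buckets := Int.toNat_of_nonneg (by omega)
    have hr0 : 0 ≤ r := PySem.Int.mod_nonneg num_train_timesteps hn
    have hinv := edges_foldl_invariant base r hr0 num_buckets.toNat
    rw [hk] at hinv
    rw [hinv]
    -- B's last edge equals num_train_timesteps, so the dropLast ++ [t] overwrite is the identity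
    have hrlt : r < num_buckets := PySem.Int.mod_lt num_train_timesteps hn
    have hsum : base * num_buckets + r = num_train_timesteps :=
      PySem.Int.floordiv_mul_add_mod num_train_timesteps num_buckets
    rw [PySem.List.pyRange_one_succ_right (a := 0) (b := num_buckets) (by omega)]
    simp only [List.map_append, List.map_cons, List.map_nil]
    rw [List.dropLast_concat]
    have hcomm : num_buckets * base = base * num_buckets := by ring
    congr 2
    omega

-- ===== VERDICT (by name: the statement is the Claim_ definition above) =====
theorem build_bucket_edges_py_spec : Claim_equal_build_bucket_edges_py := by
  intro t n _
  unfold Spec_build_bucket_edges_py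
  exact build_bucket_edges_py_eq t n
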